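-- pv_equiv track=rewrite | github.com/past12am/MathIR | DatasetProcessing/create_dataset.py | concatenate_answers
-- ===== SOURCE A (Python) =====
-- def concatenate_answers(answers, corr_idx=None):
--     res = ""
--     start_char = None
--     end_char = None
--     for idx, answer in enumerate(answers):
--         if (idx == corr_idx):
--             start_char = len(res)
--
--         res += "{" + answer + "}"
--
--         if (idx == corr_idx):
--             end_char = len(res)
--
--     return res, start_char, end_char
-- ===== SOURCE B (Python) =====
-- def concatenate_answers(answers, corr_idx=None):
--     res = "".join("{" + a + "}" for a in answers)
--     if corr_idx is not None and 0 <= corr_idx < len(answers):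
--         start_char = sum(len(a) + 2 for a in answers[:corr_idx])
--         end_char = start_char + len(answers[corr_idx]) + 2
--         return res, start_char, end_char
--     return res, None, None
-- ===== Notes on version B (the rewrite author's own statement) =====
-- stated objective: simpler
-- what changed: Builds the result with a single join instead of incremental concatenation, and computes the correct answer's char span as a closed form (prefix-sum over lengths) instead of tracking it with loop state.
import Mathlib
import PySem

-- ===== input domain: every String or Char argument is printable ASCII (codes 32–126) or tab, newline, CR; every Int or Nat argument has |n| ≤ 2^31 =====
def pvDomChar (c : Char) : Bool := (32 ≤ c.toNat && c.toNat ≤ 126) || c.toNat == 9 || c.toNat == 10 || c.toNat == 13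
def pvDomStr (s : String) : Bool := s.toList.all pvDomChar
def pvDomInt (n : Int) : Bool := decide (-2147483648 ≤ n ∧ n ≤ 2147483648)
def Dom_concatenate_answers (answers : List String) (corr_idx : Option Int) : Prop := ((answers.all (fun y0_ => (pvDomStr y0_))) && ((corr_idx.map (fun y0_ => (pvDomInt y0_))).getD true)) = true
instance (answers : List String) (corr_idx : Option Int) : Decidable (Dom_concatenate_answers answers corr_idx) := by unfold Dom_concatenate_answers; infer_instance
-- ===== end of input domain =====

-- B builds the result with one join and computes the span as a closed-form prefix sum
-- instead of tracking it with loop state (objective: simpler).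


-- ===== PORT A =====
-- the for-loop of A, with state (idx, res, start_char, end_char)
def concatLoopA (ci : Option Int) : List String → Int → String → Option Int → Option Int → String × Option Int × Option Int
  | [], _, res, s, e => (res, s, e)
  | answer :: rest, idx, res, s, e =>
    let s' := if some idx = ci then some (PySem.Str.len res) else s
    let res' := res ++ "{" ++ answer ++ "}"
    let e' := if some idx = ci then some (PySem.Str.len res') else e
    concatLoopA ci rest (idx + 1) res' s' e'

def concatenate_answers (answers : List String) (corr_idx : Option Int) : String × Option Int × Option Int :=
  concatLoopA corr_idx answers 0 "" none none

-- ===== PORT B =====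
def concatenate_answers_alt (answers : List String) (corr_idx : Option Int) : String × Option Int × Option Int :=
  let res := PySem.Str.join "" (answers.map (fun a => "{" ++ a ++ "}"))
  match corr_idx with
  | none => (res, none, none)
  | some i =>
    if 0 ≤ i ∧ i < (answers.length : Int) then
      let start_char := ((answers.take i.toNat).map (fun a => PySem.Str.len a + 2)).sum
      let end_char := start_char + PySem.Str.len (answers.getD i.toNat "") + 2
      (res, some start_char, some end_char)
    else (res, none, none)

-- ===== PRECONDITION & SPEC =====
def Spec_concatenate_answers (answers : List String) (corr_idx : Option Int) (out : String × Option Int × Option Int) : Prop := out = concatenate_answers_alt answers corr_idx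
instance (answers : List String) (corr_idx : Option Int) (out : String × Option Int × Option Int) : Decidable (Spec_concatenate_answers answers corr_idx out) := by unfold Spec_concatenate_answers; infer_instance

-- ===== CLAIM (what is proved, stated in full; the proofs are below) =====
def Claim_equal_concatenate_answers : Prop := ∀ (answers : List String) (corr_idx : Option Int), Dom_concatenate_answers answers corr_idx → Spec_concatenate_answers answers corr_idx (concatenate_answers answers corr_idx)

-- ===== LEMMAS AND PROOFS =====

lemma str_ext {s t : String} (h : s.toList = t.toList) : s = t := by
  have := congrArg String.ofList h
  simpa using this

lemma braceJoin_cons (a : String) (rest : List String) :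
    PySem.Str.join "" ((a :: rest).map (fun a => "{" ++ a ++ "}")) =
      ("{" ++ a ++ "}") ++ PySem.Str.join "" (rest.map (fun a => "{" ++ a ++ "}")) := by
  apply str_ext
  cases rest with
  | nil => simp [PySem.Chars.join_singleton, PySem.Chars.join_nil]
  | cons b r => simp [PySem.Chars.join_cons_cons]

lemma append_join_nil (res : String) : res ++ PySem.Str.join "" [] = res := by
  apply str_ext
  simp [PySem.Chars.join_nil]

lemma len_brace (res a : String) :
    PySem.Str.len (res ++ "{" ++ a ++ "}") = PySem.Str.len res + PySem.Str.len a + 2 := by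
  have h1 : PySem.Str.len "{" = 1 := by decide
  have h2 : PySem.Str.len "}" = 1 := by decide
  rw [PySem.Str.len_append, PySem.Str.len_append, PySem.Str.len_append, h1, h2]
  ring

lemma concatLoopA_none (answers : List String) : ∀ (idx : Int) (res : String) (s e : Option Int),
    concatLoopA none answers idx res s e =
      (res ++ PySem.Str.join "" (answers.map (fun a => "{" ++ a ++ "}")), s, e) := by
  induction answers with
  | nil =>
    intro idx res s e
    simp only [concatLoopA, List.map_nil]
    rw [append_join_nil]
  | cons a rest ih =>
    intro idx res s e
    simp only [concatLoopA, reduceCtorEq, if_false]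
    rw [ih, braceJoin_cons]
    exact congrArg (fun r => (r, s, e)) (str_ext (by simp))

lemma concatLoopA_some (c : Int) (answers : List String) :
    ∀ (idx : Int) (res : String) (s e : Option Int),
    concatLoopA (some c) answers idx res s e =
      ( res ++ PySem.Str.join "" (answers.map (fun a => "{" ++ a ++ "}")),
        if idx ≤ c ∧ c < idx + answers.length then
          some (PySem.Str.len res + ((answers.take (c - idx).toNat).map (fun a => PySem.Str.len a + 2)).sum)
        else s,
        if idx ≤ c ∧ c < idx + answers.length then
          some (PySem.Str.len res + ((answers.take (c - idx).toNat).map (fun a => PySem.Str.len a + 2)).sum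
            + PySem.Str.len (answers.getD (c - idx).toNat "") + 2)
        else e ) := by
  induction answers with
  | nil =>
    intro idx res s e
    simp only [concatLoopA, List.map_nil, List.length_nil, Nat.cast_zero, add_zero]
    rw [append_join_nil, if_neg (by omega), if_neg (by omega)]
  | cons a rest ih =>
    intro idx res s e
    simp only [concatLoopA, Option.some.injEq]
    rw [ih, braceJoin_cons]
    simp only [List.length_cons, Prod.mk.injEq]
    split_ifs <;> try (exfalso; omega)
    all_goals refine ⟨str_ext (by simp), ?_, ?_⟩
    all_goals first
      | rfl
      | (have h0 : (c - idx).toNat = 0 := by omega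
         simp only [h0, List.take_zero, List.map_nil, List.sum_nil,
           List.getD_eq_getElem?_getD, List.getElem?_cons_zero, Option.getD_some,
           len_brace, Option.some.injEq]
         omega)
      | (have hk : (c - idx).toNat = (c - (idx + 1)).toNat + 1 := by omega
         rw [hk]
         simp only [List.take_succ_cons, List.map_cons, List.sum_cons,
           List.getD_eq_getElem?_getD, List.getElem?_cons_succ, len_brace,
           Option.some.injEq]
         omega)

-- ===== VERDICT (by name: the statement is the Claim_ definition above) =====
theorem concatenate_answers_spec : Claim_equal_concatenate_answers := by
  intro answers corr_idx _
  unfold Spec_concatenate_answers concatenate_answers concatenate_answers_alt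
  have hlen0 : PySem.Str.len "" = 0 := by decide
  cases corr_idx with
  | none =>
    rw [concatLoopA_none]
    exact congrArg (fun r => (r, none, none)) (str_ext (by simp))
  | some c =>
    rw [concatLoopA_some]
    dsimp only
    simp only [hlen0]
    split_ifs <;> try (exfalso; omega)
    all_goals simp only [Prod.mk.injEq]
    all_goals first
      | exact str_ext (by simp)
      | exact ⟨str_ext (by simp), rfl, rfl⟩
      | (refine ⟨str_ext (by simp), ?_, ?_⟩ <;>
          (have h0 : c - 0 = c := by omega
           try simp only [h0, zero_add]
           try (first | rfl | omega | simp)))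
      | (refine ⟨?_, ?_⟩ <;>
          (have h0 : c - 0 = c := by omega
           try simp only [h0, zero_add]
           try (first | rfl | omega | simp)))
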